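-- pv_equiv track=rewrite | github.com/himamis/mathrec | normalize_data2.py | skip_brackets
-- ===== SOURCE A (Python) =====
-- def skip_brackets(formula, index, brackets=("{", "}"), direction=1):
--     """
--     Returns new index with brackets skipped.
--     Assumes that the formula does have closing brackets after index.
--
--     :param formula: list of tokens
--     :param index: index
--     :param brackets: tuple of brackets
--     :param direction: the order of traversing (+1, or -1)
--     :return: new index with skipped brackets
--     """
--     assert formula[index] == brackets[0], "Formula {} index {} does not start with bracket {}".format("".join(formula),
--                                                                                                       index,
--                                                                                                       brackets[0])
--     assert direction == 1 or direction == -1, "Direction must be between -1 or 1"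
--
--     index += direction
--     opening = 0
--     while formula[index] != brackets[1] or opening != 0:
--         if formula[index] == brackets[0]:
--             opening += 1
--         elif formula[index] == brackets[1]:
--             opening -= 1
--         index += direction
--     return index + direction
-- ===== SOURCE B (Python) =====
-- def skip_brackets(formula, index, brackets=("{", "}"), direction=1):
--     """Skip to just past the matching bracket; recursion replaces the nesting counter."""
--     assert formula[index] == brackets[0], "Formula {} index {} does not start with bracket {}".format("".join(formula),
--                                                                                                       index,
--                                                                                                       brackets[0])
--     assert direction == 1 or direction == -1, "Direction must be between -1 or 1"
--
--     index += direction
--     while formula[index] != brackets[1]: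
--         if formula[index] == brackets[0]:
--             index = skip_brackets(formula, index, brackets, direction)
--         else:
--             index += direction
--     return index + direction
-- ===== Notes on version B (the rewrite author's own statement) =====
-- stated objective: alternative
-- what changed: A tracks nesting with an explicit `opening` counter in one while-loop; B drops the counter and instead skips every inner bracket group with a recursive self-call (the call stack holds the nesting), its loop only stepping until the group's own closing token.
import Mathlib
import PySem

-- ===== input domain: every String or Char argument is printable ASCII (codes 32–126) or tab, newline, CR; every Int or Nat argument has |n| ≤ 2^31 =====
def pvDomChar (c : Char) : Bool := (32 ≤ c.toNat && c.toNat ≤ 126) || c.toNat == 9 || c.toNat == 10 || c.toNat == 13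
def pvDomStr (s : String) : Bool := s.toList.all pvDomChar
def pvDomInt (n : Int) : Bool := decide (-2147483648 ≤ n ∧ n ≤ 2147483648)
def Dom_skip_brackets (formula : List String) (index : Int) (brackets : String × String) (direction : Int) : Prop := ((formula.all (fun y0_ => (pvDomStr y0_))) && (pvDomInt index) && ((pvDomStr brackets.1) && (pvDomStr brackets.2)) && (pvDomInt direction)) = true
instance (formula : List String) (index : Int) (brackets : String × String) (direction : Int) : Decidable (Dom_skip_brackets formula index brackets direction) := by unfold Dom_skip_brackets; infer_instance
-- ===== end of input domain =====

-- B replaces A's explicit `opening` nesting counter by recursion: every inner bracket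
-- group is skipped by a recursive self-call, the call stack tracking the nesting
-- (objective: alternative decomposition, same cost; the ports are in fact proved equal
-- on ALL inputs, the Pre_ hypothesis only delimits where the Python originals return).

-- ===== PORT A =====
-- A's while-loop; fuel = one unit per token read, a pure totality guard (2*len+2 always
-- suffices on the inputs Pre_ admits; where Python raises the read hits `none` anyway).
def goA (fuel : Nat) (f : List String) (i : Int) (op cl : String) (d : Int) (opening : Int) : Option Int :=
  match fuel with
  | 0 => none
  | fuel + 1 =>
    match PySem.List.pyGet? f i with
    | none => none                      -- IndexError
    | some t =>
      if t ≠ cl ∨ opening ≠ 0 then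
        goA fuel f (i + d) op cl d
          (if t = op then opening + 1 else if t = cl then opening - 1 else opening)
      else
        some (i + d)

def skip_brackets (formula : List String) (index : Int) (brackets : String × String) (direction : Int) : Int :=
  match PySem.List.pyGet? formula index with
  | none => 0                           -- IndexError on the first assert: outside Pre_
  | some t =>
    if t = brackets.1 ∧ (direction = 1 ∨ direction = -1) then
      (goA (2 * formula.length + 2) formula (index + direction) brackets.1 brackets.2 direction 0).getD 0
    else 0                              -- AssertionError: outside Pre_

-- ===== PORT B =====
-- B's loop: at an opening token the recursive self-call (whose assert is known true
-- there, so it is its own loop again) skips the inner group.  Returns the new index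
-- together with the fuel consumed, so the continuation runs on the remaining fuel.
def goB (fuel : Nat) (f : List String) (i : Int) (op cl : String) (d : Int) : Option (Int × Nat) :=
  match fuel with
  | 0 => none
  | fuel + 1 =>
    match PySem.List.pyGet? f i with
    | none => none                      -- IndexError
    | some t =>
      if t = cl then some (i + d, 1)
      else if t = op then
        match goB fuel f (i + d) op cl d with     -- recursive skip of the inner group
        | none => none
        | some (r, u) =>
          match goB (fuel - u) f r op cl d with   -- continue past the inner group
          | none => none
          | some (r', u') => some (r', 1 + u + u')
      else
        match goB fuel f (i + d) op cl d with
        | none => none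
        | some (r, u) => some (r, 1 + u)

def skip_brackets_alt (formula : List String) (index : Int) (brackets : String × String) (direction : Int) : Int :=
  match PySem.List.pyGet? formula index with
  | none => 0
  | some t =>
    if t = brackets.1 ∧ (direction = 1 ∨ direction = -1) then
      match goB (2 * formula.length + 2) formula (index + direction) brackets.1 brackets.2 direction with
      | none => 0
      | some (r, _) => r
    else 0

-- ===== PRECONDITION & SPEC =====
-- token read at the m-th loop step
def pvTok (f : List String) (i d : Int) (m : Nat) : Option String :=
  PySem.List.pyGet? f (i + d * m)

-- weight a step's token adds to A's `opening` counter
def pvW (op cl : String) (t : Option String) : Int :=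
  if t = some op then 1 else if t = some cl then -1 else 0

-- the tokens read at steps 1 .. 2*len+1 (enough: a run that returns reads at most
-- 2*len distinct in-range positions, and a run that raises leaves the contiguous
-- in-range interval within 2*len+1 steps)
def pvPath (f : List String) (i d : Int) : List (Option String) :=
  (List.range' 1 (2 * f.length + 1)).map (pvTok f i d)

-- A's `opening` counter before each of those steps (prefix sums of the weights)
def pvBals (f : List String) (i d : Int) (op cl : String) : List Int :=
  (pvPath f i d).scanl (fun a t => a + pvW op cl t) 0

-- a step ends the scan: either the index has left the range (A raises IndexError)
-- or the token is the closing bracket at zero balance (A returns)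
def pvEvent (cl : String) (p : Option String × Int) : Bool :=
  p.1 == none || (p.1 == some cl && p.2 == 0)

-- Exactly the inputs on which Python A returns normally: both asserts pass and the
-- first scan-ending step is a closing token at zero balance, not an out-of-range read.
def Pre_skip_brackets (formula : List String) (index : Int) (brackets : String × String) (direction : Int) : Prop :=
  (direction = 1 ∨ direction = -1) ∧
  PySem.List.pyGet? formula index = some brackets.1 ∧
  (((pvPath formula index direction).zip
      (pvBals formula index direction brackets.1 brackets.2)).find?
    (pvEvent brackets.2)).any (fun p => p.1 == some brackets.2) = true

instance (formula : List String) (index : Int) (brackets : String × String) (direction : Int) : Decidable (Pre_skip_brackets formula index brackets direction) := by unfold Pre_skip_brackets; infer_instance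

def pvWitness_skip_brackets : List String × Int × (String × String) × Int :=
  (["{", "a", "{", "b", "}", "}"], 0, ("{", "}"), 1)

def Spec_skip_brackets (formula : List String) (index : Int) (brackets : String × String) (direction : Int) (out : Int) : Prop := out = skip_brackets_alt formula index brackets direction
instance (formula : List String) (index : Int) (brackets : String × String) (direction : Int) (out : Int) : Decidable (Spec_skip_brackets formula index brackets direction out) := by unfold Spec_skip_brackets; infer_instance

-- ===== CLAIM (what is proved, stated in full; the proofs are below) =====
def Claim_equal_skip_brackets : Prop := ∀ (formula : List String) (index : Int) (brackets : String × String) (direction : Int), Dom_skip_brackets formula index brackets direction → Pre_skip_brackets formula index brackets direction → Spec_skip_brackets formula index brackets direction (skip_brackets formula index brackets direction)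

-- ===== LEMMAS AND PROOFS =====

-- The main invariant: A's scan with `opening = k` equals B's recursive scan to the first
-- unmatched close, followed (if k > 0) by A's scan with `opening = k - 1` on what is left.
theorem goA_eq_goB (f : List String) (op cl : String) (d : Int) :
    ∀ (fuel : Nat) (i : Int) (k : Int), 0 ≤ k → (op = cl → k = 0) →
      goA fuel f i op cl d k =
        (match goB fuel f i op cl d with
         | none => none
         | some (r, u) => if k = 0 then some r else goA (fuel - u) f r op cl d (k - 1)) := by
  intro fuel
  induction fuel using Nat.strong_induction_on with
  | _ fuel IH =>
    intro i k hk hopcl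
    match fuel with
    | 0 => simp [goA, goB]
    | fuel + 1 =>
      cases hT : PySem.List.pyGet? f i with
      | none => simp [goA, goB, hT]
      | some t =>
        by_cases hcl : t = cl
        · -- close token
          subst hcl
          by_cases hk0 : k = 0
          · subst hk0
            simp [goA, goB, hT]
          · have hop : t ≠ op := fun h => hk0 (hopcl h.symm)
            simp only [goA, goB, hT]
            rw [if_pos (Or.inr hk0), if_neg hop]
            simp only [if_true, if_neg hk0, Nat.add_sub_cancel]
        · by_cases hop : t = op
          · -- opening token: recurse
            subst hop
            have hne : t ≠ cl := hcl
            have step : goA (fuel + 1) f i t cl d k = goA fuel f (i + d) t cl d (k + 1) := by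
              simp only [goA, hT]
              rw [if_pos (Or.inl hcl)]
              simp only [if_true]
            rw [step, IH fuel (Nat.lt_succ_self _) (i + d) (k + 1) (by omega) (fun h => absurd h hne)]
            simp only [goB, hT, if_neg hcl, if_true]
            cases h1 : goB fuel f (i + d) t cl d with
            | none => simp
            | some ru =>
              obtain ⟨r, u⟩ := ru
              simp only [if_neg (show ¬(k + 1 = 0) by omega)]
              rw [show k + 1 - 1 = k by omega,
                  IH (fuel - u) (by omega) r k hk hopcl]
              cases h2 : goB (fuel - u) f r t cl d with
              | none => simp
              | some ru' =>
                obtain ⟨r', u'⟩ := ru'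
                have heq : fuel + 1 - (1 + u + u') = fuel - u - u' := by omega
                simp [heq]
          · -- plain token
            simp only [goA, goB, hT, if_pos (Or.inl hcl), if_neg hop, if_neg hcl]
            rw [IH fuel (Nat.lt_succ_self _) (i + d) k hk hopcl]
            cases h1 : goB fuel f (i + d) op cl d with
            | none => simp
            | some ru =>
              obtain ⟨r, u⟩ := ru
              have heq : fuel + 1 - (1 + u) = fuel - u := by omega
              simp [heq]

theorem skip_brackets_eq_alt (formula : List String) (index : Int) (brackets : String × String) (direction : Int) :
    skip_brackets formula index brackets direction = skip_brackets_alt formula index brackets direction := by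
  unfold skip_brackets skip_brackets_alt
  cases hT : PySem.List.pyGet? formula index with
  | none => rfl
  | some t =>
    by_cases hc : t = brackets.1 ∧ (direction = 1 ∨ direction = -1)
    · simp only [if_pos hc]
      rw [goA_eq_goB formula brackets.1 brackets.2 direction (2 * formula.length + 2)
            (index + direction) 0 le_rfl (fun _ => rfl)]
      cases goB (2 * formula.length + 2) formula (index + direction) brackets.1 brackets.2 direction with
      | none => rfl
      | some ru => cases ru; simp
    · simp [if_neg hc]

-- ===== VERDICT (by name: the statement is the Claim_ definition above) =====
theorem skip_brackets_spec : Claim_equal_skip_brackets := by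
  intro formula index brackets direction _ _
  unfold Spec_skip_brackets
  exact skip_brackets_eq_alt formula index brackets direction
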